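-- pv_equiv track=rewrite | github.com/qianchongyang/zhizhang-writer | webnovel-writer/scripts/data_modules/technique_blueprint.py | _pick_with_fatigue
-- ===== SOURCE A (Python) =====
-- from typing import Any, Dict, List, Mapping
--
-- def _pick_with_fatigue(candidates: List[str], fatigue: List[str], dominant: str = "") -> List[str]:
--     seen = set()
--     ordered: List[str] = []
--     fatigue_set = {str(item) for item in fatigue if str(item).strip()}
--     for token in candidates:
--         if token == dominant:
--             continue
--         if token in fatigue_set:
--             continue
--         if token not in seen:
--             ordered.append(token)
--             seen.add(token)
--     for token in candidates:
--         if token not in seen and token != dominant: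
--             ordered.append(token)
--             seen.add(token)
--     if dominant and dominant not in seen:
--         ordered.append(dominant)
--     return ordered
-- ===== SOURCE B (Python) =====
-- def _pick_with_fatigue(candidates, fatigue, dominant=""):
--     fatigue_set = {str(item) for item in fatigue if str(item).strip()}
--     seen = set()
--     primary = []
--     secondary = []
--     for token in candidates:
--         if token == dominant or token in seen:
--             continue
--         seen.add(token)
--         (secondary if token in fatigue_set else primary).append(token)
--     result = primary + secondary
--     if dominant:
--         result.append(dominant)
--     return result
-- ===== Notes on version B (the rewrite author's own statement) =====
-- stated objective: simpler
-- what changed: A's two sequential dedup passes over candidates (non-fatigue first, then leftovers) plus a seen-membership check on dominant are replaced by one pass that routes each new token into a primary or secondary list by fatigue membership and appends dominant iff it is non-empty.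
import Mathlib
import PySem

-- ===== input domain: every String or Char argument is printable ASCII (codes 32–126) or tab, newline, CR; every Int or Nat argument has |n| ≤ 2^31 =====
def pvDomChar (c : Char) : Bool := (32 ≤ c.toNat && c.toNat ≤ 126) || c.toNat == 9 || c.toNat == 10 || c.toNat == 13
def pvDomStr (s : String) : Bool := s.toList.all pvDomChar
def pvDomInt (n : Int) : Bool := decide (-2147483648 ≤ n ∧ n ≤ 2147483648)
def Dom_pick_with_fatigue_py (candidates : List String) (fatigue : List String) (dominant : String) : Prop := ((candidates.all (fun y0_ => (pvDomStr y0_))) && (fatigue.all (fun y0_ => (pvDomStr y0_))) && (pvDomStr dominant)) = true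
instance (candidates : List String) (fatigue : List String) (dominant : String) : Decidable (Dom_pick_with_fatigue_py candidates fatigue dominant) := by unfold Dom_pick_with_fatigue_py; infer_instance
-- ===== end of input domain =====

-- B replaces A's two dedup passes by one pass routing tokens into primary/secondary lists (objective: simpler).

-- ===== PORT A =====
-- fatigue_set = {str(item) for item in fatigue if str(item).strip()}  (str(item) = item on List String)
def pvFatigueSet (fatigue : List String) : PySem.Set String :=
  PySem.Set.ofList (fatigue.filter (fun item => !(PySem.Str.strip item == "")))

-- first loop body of A
def pvStepA1 (dominant : String) (F : PySem.Set String)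
    (st : PySem.Set String × List String) (token : String) : PySem.Set String × List String :=
  if token = dominant then st
  else if token ∈ F then st
  else if token ∉ st.1 then (st.1.add token, st.2 ++ [token]) else st

-- second loop body of A
def pvStepA2 (dominant : String)
    (st : PySem.Set String × List String) (token : String) : PySem.Set String × List String :=
  if token ∉ st.1 ∧ token ≠ dominant then (st.1.add token, st.2 ++ [token]) else st

def pick_with_fatigue_py (candidates : List String) (fatigue : List String) (dominant : String) : List String :=
  let fatigue_set := pvFatigueSet fatigue
  let st1 := candidates.foldl (pvStepA1 dominant fatigue_set) (PySem.Set.empty, [])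
  let st2 := candidates.foldl (pvStepA2 dominant) st1
  if dominant ≠ "" ∧ dominant ∉ st2.1 then st2.2 ++ [dominant] else st2.2

-- ===== PORT B =====
-- single loop body of B: seen × primary × secondary
def pvStepB (dominant : String) (F : PySem.Set String)
    (st : PySem.Set String × List String × List String) (token : String) :
    PySem.Set String × List String × List String :=
  if token = dominant ∨ token ∈ st.1 then st
  else if token ∈ F then (st.1.add token, st.2.1, st.2.2 ++ [token])
  else (st.1.add token, st.2.1 ++ [token], st.2.2)

def pick_with_fatigue_py_alt (candidates : List String) (fatigue : List String) (dominant : String) : List String :=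
  let fatigue_set := pvFatigueSet fatigue
  let st := candidates.foldl (pvStepB dominant fatigue_set) (PySem.Set.empty, [], [])
  let result := st.2.1 ++ st.2.2
  if dominant ≠ "" then result ++ [dominant] else result

-- ===== PRECONDITION & SPEC =====
def Spec_pick_with_fatigue_py (candidates : List String) (fatigue : List String) (dominant : String) (out : List String) : Prop := out = pick_with_fatigue_py_alt candidates fatigue dominant
instance (candidates : List String) (fatigue : List String) (dominant : String) (out : List String) : Decidable (Spec_pick_with_fatigue_py candidates fatigue dominant out) := by unfold Spec_pick_with_fatigue_py; infer_instance

-- ===== CLAIM (what is proved, stated in full; the proofs are below) =====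
def Claim_equal_pick_with_fatigue_py : Prop := ∀ (candidates : List String) (fatigue : List String) (dominant : String), Dom_pick_with_fatigue_py candidates fatigue dominant → Spec_pick_with_fatigue_py candidates fatigue dominant (pick_with_fatigue_py candidates fatigue dominant)

-- ===== LEMMAS AND PROOFS =====

-- the tokens A's first loop appends, as a pure recursion over candidates
def pvPrimL (d : String) (F : PySem.Set String) (s : PySem.Set String) : List String → List String
  | [] => []
  | t :: ts => if t = d ∨ t ∈ F ∨ t ∈ s then pvPrimL d F s ts
               else t :: pvPrimL d F (s.add t) ts

-- the tokens B's loop appends to secondary, as a pure recursion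
def pvSecL (d : String) (F : PySem.Set String) (s : PySem.Set String) : List String → List String
  | [] => []
  | t :: ts => if t = d ∨ t ∉ F ∨ t ∈ s then pvSecL d F s ts
               else t :: pvSecL d F (s.add t) ts

-- the tokens A's second loop appends, as a pure recursion
def pvSec2L (d : String) (s : PySem.Set String) : List String → List String
  | [] => []
  | t :: ts => if t ∉ s ∧ t ≠ d then t :: pvSec2L d (s.add t) ts
               else pvSec2L d s ts

theorem pvA1_list (d : String) (F : PySem.Set String) :
    ∀ (cs : List String) (s : PySem.Set String) (p : List String),
      (List.foldl (pvStepA1 d F) (s, p) cs).2 = p ++ pvPrimL d F s cs := by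
  intro cs
  induction cs with
  | nil => intro s p; simp [pvPrimL]
  | cons t ts ih =>
    intro s p
    simp only [List.foldl, pvStepA1, pvPrimL]
    by_cases h1 : t = d
    · simp [h1, ih]
    · by_cases h2 : t ∈ F
      · simp [h1, h2, ih]
      · by_cases h3 : t ∈ s
        · simp [h1, h2, h3, ih]
        · simp [h1, h2, h3, ih]

theorem pvA1_mem (d : String) (F : PySem.Set String) :
    ∀ (cs : List String) (s : PySem.Set String) (p : List String) (u : String),
      (u ∈ (List.foldl (pvStepA1 d F) (s, p) cs).1 ↔
        u ∈ s ∨ (u ∈ cs ∧ u ≠ d ∧ u ∉ F)) := by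
  intro cs
  induction cs with
  | nil => intro s p u; simp
  | cons t ts ih =>
    intro s p u
    simp only [List.foldl, pvStepA1]
    by_cases h1 : t = d
    · rw [if_pos h1, ih]
      constructor
      · rintro (h | ⟨hm, hd, hf⟩)
        · exact Or.inl h
        · exact Or.inr ⟨List.mem_cons_of_mem _ hm, hd, hf⟩
      · rintro (h | ⟨hm, hd, hf⟩)
        · exact Or.inl h
        · rcases List.mem_cons.mp hm with rfl | hm'
          · exact absurd h1 hd
          · exact Or.inr ⟨hm', hd, hf⟩
    · rw [if_neg h1]
      by_cases h2 : t ∈ F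
      · rw [if_pos h2, ih]
        constructor
        · rintro (h | ⟨hm, hd, hf⟩)
          · exact Or.inl h
          · exact Or.inr ⟨List.mem_cons_of_mem _ hm, hd, hf⟩
        · rintro (h | ⟨hm, hd, hf⟩)
          · exact Or.inl h
          · rcases List.mem_cons.mp hm with rfl | hm'
            · exact absurd h2 hf
            · exact Or.inr ⟨hm', hd, hf⟩
      · rw [if_neg h2]
        by_cases h3 : t ∈ s
        · rw [if_neg (by simp [h3]), ih]
          constructor
          · rintro (h | ⟨hm, hd, hf⟩)
            · exact Or.inl h
            · exact Or.inr ⟨List.mem_cons_of_mem _ hm, hd, hf⟩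
          · rintro (h | ⟨hm, hd, hf⟩)
            · exact Or.inl h
            · rcases List.mem_cons.mp hm with rfl | hm'
              · exact Or.inl h3
              · exact Or.inr ⟨hm', hd, hf⟩
        · rw [if_pos (by simp [h3]), ih]
          simp only [PySem.Set.mem_add]
          constructor
          · rintro ((h | rfl) | ⟨hm, hd, hf⟩)
            · exact Or.inl h
            · exact Or.inr ⟨List.mem_cons_self, h1, h2⟩
            · exact Or.inr ⟨List.mem_cons_of_mem _ hm, hd, hf⟩
          · rintro (h | ⟨hm, hd, hf⟩)
            · exact Or.inl (Or.inl h)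
            · rcases List.mem_cons.mp hm with rfl | hm'
              · exact Or.inl (Or.inr rfl)
              · exact Or.inr ⟨hm', hd, hf⟩

theorem pvA2_list (d : String) :
    ∀ (cs : List String) (s : PySem.Set String) (p : List String),
      (List.foldl (pvStepA2 d) (s, p) cs).2 = p ++ pvSec2L d s cs := by
  intro cs
  induction cs with
  | nil => intro s p; simp [pvSec2L]
  | cons t ts ih =>
    intro s p
    simp only [List.foldl, pvStepA2, pvSec2L]
    by_cases h : t ∉ s ∧ t ≠ d
    · simp [h, ih]
    · simp [h, ih]

theorem pvA2_mem (d : String) :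
    ∀ (cs : List String) (s : PySem.Set String) (p : List String) (u : String),
      (u ∈ (List.foldl (pvStepA2 d) (s, p) cs).1 ↔
        u ∈ s ∨ (u ∈ cs ∧ u ≠ d)) := by
  intro cs
  induction cs with
  | nil => intro s p u; simp
  | cons t ts ih =>
    intro s p u
    simp only [List.foldl, pvStepA2]
    by_cases h : t ∉ s ∧ t ≠ d
    · rw [if_pos h, ih]
      simp only [PySem.Set.mem_add]
      constructor
      · rintro ((hs | rfl) | ⟨hm, hd⟩)
        · exact Or.inl hs
        · exact Or.inr ⟨List.mem_cons_self, h.2⟩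
        · exact Or.inr ⟨List.mem_cons_of_mem _ hm, hd⟩
      · rintro (hs | ⟨hm, hd⟩)
        · exact Or.inl (Or.inl hs)
        · rcases List.mem_cons.mp hm with rfl | hm'
          · exact Or.inl (Or.inr rfl)
          · exact Or.inr ⟨hm', hd⟩
    · rw [if_neg h, ih]
      constructor
      · rintro (hs | ⟨hm, hd⟩)
        · exact Or.inl hs
        · exact Or.inr ⟨List.mem_cons_of_mem _ hm, hd⟩
      · rintro (hs | ⟨hm, hd⟩)
        · exact Or.inl hs
        · rcases List.mem_cons.mp hm with rfl | hm'
          · rcases not_and_or.mp h with hc | hd'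
            · exact Or.inl (not_not.mp hc)
            · exact absurd hd (by simpa using hd')
          · exact Or.inr ⟨hm', hd⟩

-- B's fold, with the seen set split into a non-fatigue view sp and a fatigue view sf
theorem pvB_lists (d : String) (F : PySem.Set String) :
    ∀ (cs : List String) (sB sp sf : PySem.Set String) (p q : List String),
      (∀ u, u ∉ F → (u ∈ sB ↔ u ∈ sp)) →
      (∀ u, u ∈ F → (u ∈ sB ↔ u ∈ sf)) →
      (List.foldl (pvStepB d F) (sB, p, q) cs).2.1 = p ++ pvPrimL d F sp cs ∧
      (List.foldl (pvStepB d F) (sB, p, q) cs).2.2 = q ++ pvSecL d F sf cs := by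
  intro cs
  induction cs with
  | nil => intro sB sp sf p q _ _; simp [pvPrimL, pvSecL]
  | cons t ts ih =>
    intro sB sp sf p q Hp Hf
    simp only [List.foldl, pvStepB, pvPrimL, pvSecL]
    by_cases h1 : t = d
    · rw [if_pos (Or.inl h1), if_pos (Or.inl h1), if_pos (Or.inl h1)]
      exact ih sB sp sf p q Hp Hf
    · by_cases hB : t ∈ sB
      · rw [if_pos (Or.inr hB)]
        by_cases h2 : t ∈ F
        · rw [if_pos (Or.inr (Or.inl h2)), if_pos (Or.inr (Or.inr ((Hf t h2).mp hB)))]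
          exact ih sB sp sf p q Hp Hf
        · rw [if_pos (Or.inr (Or.inr ((Hp t h2).mp hB))), if_pos (Or.inr (Or.inl h2))]
          exact ih sB sp sf p q Hp Hf
      · rw [if_neg (by push_neg; exact ⟨h1, hB⟩)]
        by_cases h2 : t ∈ F
        · rw [if_pos h2]
          rw [if_pos (Or.inr (Or.inl h2))]
          rw [if_neg (by push_neg; exact ⟨h1, h2, fun hc => hB ((Hf t h2).mpr hc)⟩)]
          have := ih (sB.add t) sp (sf.add t) p (q ++ [t])
            (fun u hu => by
              rw [PySem.Set.mem_add]
              constructor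
              · rintro (h | rfl)
                · exact (Hp u hu).mp h
                · exact absurd h2 hu
              · intro h; exact Or.inl ((Hp u hu).mpr h))
            (fun u hu => by
              rw [PySem.Set.mem_add, PySem.Set.mem_add]
              constructor
              · rintro (h | rfl)
                · exact Or.inl ((Hf u hu).mp h)
                · exact Or.inr rfl
              · rintro (h | rfl)
                · exact Or.inl ((Hf u hu).mpr h)
                · exact Or.inr rfl)
          rcases this with ⟨hx, hy⟩
          exact ⟨hx, by rw [hy]; simp⟩
        · rw [if_neg h2]
          rw [if_neg (by push_neg; exact ⟨h1, h2, fun hc => hB ((Hp t h2).mpr hc)⟩)]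
          rw [if_pos (Or.inr (Or.inl h2))]
          have := ih (sB.add t) (sp.add t) sf (p ++ [t]) q
            (fun u hu => by
              rw [PySem.Set.mem_add, PySem.Set.mem_add]
              constructor
              · rintro (h | rfl)
                · exact Or.inl ((Hp u hu).mp h)
                · exact Or.inr rfl
              · rintro (h | rfl)
                · exact Or.inl ((Hp u hu).mpr h)
                · exact Or.inr rfl)
            (fun u hu => by
              rw [PySem.Set.mem_add]
              constructor
              · rintro (h | rfl)
                · exact (Hf u hu).mp h
                · exact absurd hu h2
              · intro h; exact Or.inl ((Hf u hu).mpr h))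
          rcases this with ⟨hx, hy⟩
          exact ⟨by rw [hx]; simp, hy⟩

-- A's second loop equals B's secondary recursion when the seen sets agree in the stated way
theorem pv_bridge (d : String) (F : PySem.Set String) :
    ∀ (cs : List String) (s sf : PySem.Set String),
      (∀ t ∈ cs, ((t ∉ s ∧ t ≠ d) ↔ (t ≠ d ∧ t ∈ F ∧ t ∉ sf))) →
      pvSec2L d s cs = pvSecL d F sf cs := by
  intro cs
  induction cs with
  | nil => intro s sf _; simp [pvSec2L, pvSecL]
  | cons t ts ih =>
    intro s sf H
    simp only [pvSec2L, pvSecL]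
    by_cases h : t ∉ s ∧ t ≠ d
    · rcases (H t List.mem_cons_self).mp h with ⟨hd, hF, hsf⟩
      rw [if_pos h, if_neg (by push_neg; exact ⟨hd, hF, hsf⟩)]
      congr 1
      refine ih (s.add t) (sf.add t) (fun u hu => ?_)
      rw [PySem.Set.mem_add, PySem.Set.mem_add]
      constructor
      · rintro ⟨hns, hud⟩
        push_neg at hns
        rcases (H u (List.mem_cons_of_mem _ hu)).mp ⟨hns.1, hud⟩ with ⟨h1, h2, h3⟩
        exact ⟨h1, h2, by push_neg; exact ⟨h3, hns.2⟩⟩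
      · rintro ⟨h1, h2, h3⟩
        push_neg at h3
        rcases (H u (List.mem_cons_of_mem _ hu)).mpr ⟨h1, h2, h3.1⟩ with ⟨hns, hud⟩
        exact ⟨by push_neg; exact ⟨hns, h3.2⟩, hud⟩
    · rw [if_neg h]
      have hskip : ¬ (t ≠ d ∧ t ∈ F ∧ t ∉ sf) := fun hc => h ((H t List.mem_cons_self).mpr hc)
      rw [if_pos (by by_contra hc; push_neg at hc; exact hskip ⟨hc.1, hc.2.1, hc.2.2⟩)]
      exact ih s sf (fun u hu => H u (List.mem_cons_of_mem _ hu))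

-- ===== VERDICT (by name: the statement is the Claim_ definition above) =====
theorem pick_with_fatigue_py_spec : Claim_equal_pick_with_fatigue_py := by
  intro candidates fatigue dominant _
  unfold Spec_pick_with_fatigue_py pick_with_fatigue_py pick_with_fatigue_py_alt
  dsimp only
  have hs1mem : ∀ u, (u ∈ (List.foldl (pvStepA1 dominant (pvFatigueSet fatigue)) (PySem.Set.empty, []) candidates).1 ↔ (u ∈ candidates ∧ u ≠ dominant ∧ u ∉ pvFatigueSet fatigue)) := by
    intro u; rw [pvA1_mem]; simp [PySem.Set.empty]
  have ho1 := pvA1_list dominant (pvFatigueSet fatigue) candidates PySem.Set.empty []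
  generalize hst1 : List.foldl (pvStepA1 dominant (pvFatigueSet fatigue)) (PySem.Set.empty, []) candidates = st1 at hs1mem ho1 ⊢
  obtain ⟨s1, o1⟩ := st1
  have ho2 := pvA2_list dominant candidates s1 o1
  have hs2mem := pvA2_mem dominant candidates s1 o1 dominant
  generalize hst2 : List.foldl (pvStepA2 dominant) (s1, o1) candidates = st2 at ho2 hs2mem ⊢
  obtain ⟨s2, o2⟩ := st2
  have hB := pvB_lists dominant (pvFatigueSet fatigue) candidates PySem.Set.empty PySem.Set.empty PySem.Set.empty [] []
    (fun u _ => Iff.rfl) (fun u _ => Iff.rfl)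
  generalize hstB : List.foldl (pvStepB dominant (pvFatigueSet fatigue)) (PySem.Set.empty, [], []) candidates = stB at hB ⊢
  obtain ⟨sb, pb, qb⟩ := stB
  simp only at hs1mem ho1 ho2 hs2mem hB ⊢
  have hnd : dominant ∉ s2 := by
    rw [hs2mem]
    rintro (h | ⟨_, hd⟩)
    · exact ((hs1mem dominant).mp h).2.1 rfl
    · exact hd rfl
  have hbridge : pvSec2L dominant s1 candidates = pvSecL dominant (pvFatigueSet fatigue) PySem.Set.empty candidates := by
    refine pv_bridge dominant (pvFatigueSet fatigue) candidates s1 PySem.Set.empty (fun t ht => ?_)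
    constructor
    · rintro ⟨hns, hd⟩
      refine ⟨hd, ?_, by simp [PySem.Set.empty]⟩
      by_contra hc
      exact hns ((hs1mem t).mpr ⟨ht, hd, hc⟩)
    · rintro ⟨hd, hFt, _⟩
      exact ⟨fun hc => ((hs1mem t).mp hc).2.2 hFt, hd⟩
  have hout : o2 = pb ++ qb := by
    rw [ho2, ho1, hbridge, hB.1, hB.2]; simp
  by_cases hd : dominant = ""
  · rw [if_neg (by simp [hd]), if_neg (by simp [hd]), hout]
  · rw [if_pos ⟨hd, hnd⟩, if_pos hd, hout]
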